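-- pv_equiv track=rewrite | github.com/jason-zhj/hash-webapp | imghash/hashutil.py | compute_dist_hash
-- ===== SOURCE A (Python) =====
-- import itertools
--
-- def compute_dist_hash(hashcode,dist):
--     "`hashcode` should only contain '0' and '1', return a list of hash strings, whose hamming distance to `hashcode` is `dist`"
--     hash_ls = []
--     invert = lambda x:"1" if x=="0" else "0"
--     code_length = len(hashcode)
--     for positions in itertools.combinations(range(code_length),dist):
--         # invert the hash bit at `positions`
--         computed_code = "".join([invert(hashcode[i]) if i in positions else hashcode[i]
--                                  for i in range(code_length)])
--         hash_ls.append(computed_code)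
--
--     return hash_ls
-- ===== SOURCE B (Python) =====
-- def compute_dist_hash(hashcode, dist):
--     "`hashcode` should only contain '0' and '1', return a list of hash strings, whose hamming distance to `hashcode` is `dist`"
--     n = len(hashcode)
--
--     def rec(i, d):
--         # suffixes of length n-i differing from hashcode[i:] in exactly d positions,
--         # flip branch first so the overall order matches lexicographic position choice
--         if i == n:
--             return [""] if d == 0 else []
--         out = []
--         if d > 0:
--             flipped = "1" if hashcode[i] == "0" else "0"
--             out = [flipped + s for s in rec(i + 1, d - 1)]
--         out += [hashcode[i] + s for s in rec(i + 1, d)]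
--         return out
--
--     return rec(0, dist)
-- ===== Notes on version B (the rewrite author's own statement) =====
-- stated objective: alternative
-- what changed: Replaces the itertools.combinations loop that rebuilds the whole string per position-set with a single recursion over positions that emits, per index, the flip branch then the keep branch, constructing suffixes directly.
import Mathlib
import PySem

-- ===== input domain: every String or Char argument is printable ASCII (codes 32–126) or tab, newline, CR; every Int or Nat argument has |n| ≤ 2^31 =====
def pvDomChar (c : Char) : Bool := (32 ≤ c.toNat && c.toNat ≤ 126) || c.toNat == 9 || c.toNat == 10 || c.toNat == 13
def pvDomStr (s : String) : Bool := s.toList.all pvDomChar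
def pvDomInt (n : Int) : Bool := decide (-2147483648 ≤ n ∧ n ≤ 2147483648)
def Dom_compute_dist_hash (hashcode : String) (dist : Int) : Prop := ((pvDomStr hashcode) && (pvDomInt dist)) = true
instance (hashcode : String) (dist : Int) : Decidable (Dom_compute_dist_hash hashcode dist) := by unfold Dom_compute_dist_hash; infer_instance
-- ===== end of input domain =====

-- B replaces A's combinations-then-rebuild loop by one flip-first recursion over positions (alternative decomposition).

-- ===== PORT A =====
-- invert = lambda x: "1" if x=="0" else "0"
def pvInvert (c : Char) : Char := if c = '0' then '1' else '0'

-- exact port of itertools.combinations(xs, r) for r ≥ 0: lexicographic order of index tuples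
def pvCombos : List Nat → Nat → List (List Nat)
  | _, 0 => [[]]
  | [], _ + 1 => []
  | x :: xs, k + 1 => (pvCombos xs k).map (x :: ·) ++ pvCombos xs (k + 1)

-- transliteration of A; the combinations loop is a map over pvCombos (range n),
-- each computed_code a join over range(n) with the `i in positions` test.
-- For dist < 0 Python raises ValueError (excluded by Pre_); the port returns [] there.
def compute_dist_hash (hashcode : String) (dist : Int) : List String :=
  let cs := hashcode.toList
  let code_length := cs.length
  if dist < 0 then []
  else
    (pvCombos (List.range code_length) dist.toNat).map (fun positions =>
      String.ofList ((List.range code_length).map (fun i =>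
        if positions.contains i then pvInvert (cs.getD i ' ') else cs.getD i ' ')))

-- ===== PORT B =====
-- rec(i, d): suffixes differing from hashcode[i:] in exactly d positions, flip branch first
def pvRec : List Char → Int → List String
  | [], d => if d = 0 then [""] else []
  | c :: cs, d =>
      (if d > 0 then
        let flipped : Char := if c = '0' then '1' else '0'
        (pvRec cs (d - 1)).map (fun s => String.ofList (flipped :: s.toList))
      else [])
      ++ (pvRec cs d).map (fun s => String.ofList (c :: s.toList))

def compute_dist_hash_alt (hashcode : String) (dist : Int) : List String :=
  pvRec hashcode.toList dist

-- ===== PRECONDITION & SPEC =====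
-- Pre_ excludes dist < 0, on which A raises ValueError (from itertools.combinations).
def Pre_compute_dist_hash (hashcode : String) (dist : Int) : Prop := 0 ≤ dist
instance (hashcode : String) (dist : Int) : Decidable (Pre_compute_dist_hash hashcode dist) := by
  unfold Pre_compute_dist_hash; infer_instance
def pvWitness_compute_dist_hash : String × Int := ("0110", 2)

def Spec_compute_dist_hash (hashcode : String) (dist : Int) (out : List String) : Prop := out = compute_dist_hash_alt hashcode dist
instance (hashcode : String) (dist : Int) (out : List String) : Decidable (Spec_compute_dist_hash hashcode dist out) := by unfold Spec_compute_dist_hash; infer_instance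

-- ===== CLAIM (what is proved, stated in full; the proofs are below) =====
def Claim_equal_compute_dist_hash : Prop := ∀ (hashcode : String) (dist : Int), Dom_compute_dist_hash hashcode dist → Pre_compute_dist_hash hashcode dist → Spec_compute_dist_hash hashcode dist (compute_dist_hash hashcode dist)

-- ===== LEMMAS AND PROOFS =====

-- combinations commutes with mapping a function over the pool
lemma pvCombos_map (f : Nat → Nat) : ∀ (xs : List Nat) (k : Nat),
    pvCombos (xs.map f) k = (pvCombos xs k).map (List.map f) := by
  intro xs
  induction xs with
  | nil => intro k; cases k <;> simp [pvCombos]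
  | cons x xs ih =>
      intro k
      cases k with
      | zero => simp [pvCombos]
      | succ k =>
          simp only [List.map_cons, pvCombos, ih, List.map_append, List.map_map]
          rfl

-- A's per-combination string body, factored out for the induction
def pvBuild (cs : List Char) (ps : List Nat) : List Char :=
  (List.range cs.length).map (fun i =>
    if ps.contains i then pvInvert (cs.getD i ' ') else cs.getD i ' ')

lemma pvBuild_flip (c : Char) (cs : List Char) (ps : List Nat) :
    pvBuild (c :: cs) (0 :: ps.map (· + 1)) = pvInvert c :: pvBuild cs ps := by
  simp only [pvBuild, List.length_cons, List.range_succ_eq_map, List.map_cons, List.map_map]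
  congr 1 <;> simp [Function.comp, Nat.succ_eq_add_one]

lemma pvBuild_keep (c : Char) (cs : List Char) (ps : List Nat) :
    pvBuild (c :: cs) (ps.map (· + 1)) = c :: pvBuild cs ps := by
  simp only [pvBuild, List.length_cons, List.range_succ_eq_map, List.map_cons, List.map_map]
  congr 1 <;> simp [Function.comp, Nat.succ_eq_add_one]

-- main bridge: B's recursion equals A's combinations-map, for nonnegative d given as a Nat cast
lemma pvRec_eq_combos : ∀ (cs : List Char) (k : Nat),
    pvRec cs (k : Int) = (pvCombos (List.range cs.length) k).map (fun ps => String.ofList (pvBuild cs ps)) := by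
  intro cs
  induction cs with
  | nil =>
      intro k
      cases k with
      | zero => simp [pvRec, pvCombos, pvBuild]
      | succ k =>
          simp [pvRec, pvCombos]
          omega
  | cons c cs ih =>
      intro k
      cases k with
      | zero =>
          have h0 := ih 0
          have hb : pvBuild (c :: cs) [] = c :: pvBuild cs [] := by
            have := pvBuild_keep c cs []
            simpa using this
          simp only [Nat.cast_zero] at h0 ⊢
          simp [pvRec, pvCombos, h0, hb]
      | succ k =>
          have hpos : ((k + 1 : Nat) : Int) > 0 := by exact_mod_cast Nat.succ_pos k
          have hsub : ((k + 1 : Nat) : Int) - 1 = (k : Int) := by push_cast; ring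
          simp only [pvRec, if_pos hpos, hsub, ih]
          have hrange : List.range (c :: cs).length = 0 :: (List.range cs.length).map (· + 1) := by
            simp [List.range_succ_eq_map]
          rw [hrange]
          show _ = List.map _ (pvCombos (0 :: (List.range cs.length).map (· + 1)) (k + 1))
          simp only [pvCombos, pvCombos_map, List.map_append, List.map_map]
          congr 1
          · refine List.map_congr_left ?_
            intro ps _
            simp [Function.comp, pvBuild_flip, pvInvert]
          · refine List.map_congr_left ?_
            intro ps _
            simp [Function.comp, pvBuild_keep]

-- ===== VERDICT (by name: the statement is the Claim_ definition above) =====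
theorem compute_dist_hash_spec : Claim_equal_compute_dist_hash := by
  intro hashcode dist _ hpre
  unfold Spec_compute_dist_hash compute_dist_hash compute_dist_hash_alt
  have hlt : ¬ dist < 0 := not_lt.mpr hpre
  simp only [if_neg hlt]
  have hcast : ((dist.toNat : Nat) : Int) = dist := Int.toNat_of_nonneg hpre
  have h := pvRec_eq_combos hashcode.toList dist.toNat
  rw [hcast] at h
  rw [h]
  simp [pvBuild]
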